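-- pv_equiv track=rewrite | github.com/X-rayLaser/pytorch-handwriting-synthesis-toolkit | handwriting_synthesis/data.py | to_strokes
-- ===== SOURCE A (Python) =====
-- def to_strokes(points):
--     if not points:
--         return []
--
--     strokes = []
--     current_stroke = []
--     for p in points:
--         x, y, eos = p
--         current_stroke.append((x, y))
--         if eos == 1:
--             strokes.append(current_stroke)
--             current_stroke = []
--
--     if current_stroke:
--         strokes.append(current_stroke)
--     return strokes
-- ===== SOURCE B (Python) =====
-- def to_strokes(points):
--     cuts = [i for i, (x, y, eos) in enumerate(points) if eos == 1]
--     strokes = []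
--     start = 0
--     for i in cuts:
--         strokes.append([(x, y) for x, y, _ in points[start:i + 1]])
--         start = i + 1
--     if start < len(points):
--         strokes.append([(x, y) for x, y, _ in points[start:]])
--     return strokes
-- ===== Notes on version B (the rewrite author's own statement) =====
-- stated objective: alternative
-- what changed: Instead of one stateful pass growing a current stroke, B first collects the indices of end-of-stroke points and then cuts the list into strokes by slicing between consecutive cut positions (plus the trailing slice).
import Mathlib
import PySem

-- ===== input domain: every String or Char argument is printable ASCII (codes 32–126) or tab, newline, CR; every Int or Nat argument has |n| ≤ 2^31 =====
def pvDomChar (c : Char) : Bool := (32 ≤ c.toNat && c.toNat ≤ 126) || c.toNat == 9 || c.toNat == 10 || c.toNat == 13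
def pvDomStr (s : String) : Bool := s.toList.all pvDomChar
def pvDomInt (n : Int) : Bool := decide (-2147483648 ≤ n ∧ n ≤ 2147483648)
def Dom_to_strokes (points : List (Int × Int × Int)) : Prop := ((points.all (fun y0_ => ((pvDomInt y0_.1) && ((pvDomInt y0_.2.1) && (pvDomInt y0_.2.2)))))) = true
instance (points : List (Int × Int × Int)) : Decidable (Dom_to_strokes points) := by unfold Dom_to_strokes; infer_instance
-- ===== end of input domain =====

-- B cuts the point list into strokes by collecting the end-of-stroke indices first and slicing
-- between consecutive cuts, instead of A's single stateful pass; alternative decomposition, same cost.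

-- ===== PORT A =====
-- (x, y) taken from a point (x, y, eos)
def pvXY (p : Int × Int × Int) : Int × Int := (p.1, p.2.1)

-- A's loop body: append (x,y) to the current stroke; on eos == 1 close the stroke
def pvStepA (st : List (List (Int × Int)) × List (Int × Int)) (p : Int × Int × Int) :
    List (List (Int × Int)) × List (Int × Int) :=
  let cur := st.2 ++ [pvXY p]
  if p.2.2 == 1 then (st.1 ++ [cur], []) else (st.1, cur)

def to_strokes (points : List (Int × Int × Int)) : List (List (Int × Int)) :=
  if points = [] then []
  else
    let st := points.foldl pvStepA ([], [])
    if st.2 ≠ [] then st.1 ++ [st.2] else st.1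

-- ===== PORT B =====
-- cuts = [i for i, (x, y, eos) in enumerate(points) if eos == 1]
def pvCuts (points : List (Int × Int × Int)) : List Int :=
  ((PySem.List.enumerate points 0).filter (fun ie => ie.2.2.2 == 1)).map (fun ie => ie.1)

-- B's loop body: slice points[start:i+1], convert to (x, y), advance start = i+1
def pvStepB (points : List (Int × Int × Int)) (st : List (List (Int × Int)) × Int) (i : Int) :
    List (List (Int × Int)) × Int :=
  (st.1 ++ [(PySem.List.slice points (some st.2) (some (i + 1))).map pvXY], i + 1)

def to_strokes_alt (points : List (Int × Int × Int)) : List (List (Int × Int)) :=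
  let st := (pvCuts points).foldl (pvStepB points) ([], 0)
  if st.2 < (points.length : Int) then
    st.1 ++ [(PySem.List.slice points (some st.2) none).map pvXY]
  else st.1

-- ===== PRECONDITION & SPEC =====
def Spec_to_strokes (points : List (Int × Int × Int)) (out : List (List (Int × Int))) : Prop := out = to_strokes_alt points
instance (points : List (Int × Int × Int)) (out : List (List (Int × Int))) : Decidable (Spec_to_strokes points out) := by unfold Spec_to_strokes; infer_instance

-- ===== CLAIM (what is proved, stated in full; the proofs are below) =====
def Claim_equal_to_strokes : Prop := ∀ (points : List (Int × Int × Int)), Dom_to_strokes points → Spec_to_strokes points (to_strokes points)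

-- ===== LEMMAS AND PROOFS =====

-- common recursive characterisation of the stroke split
def pvRec : List (Int × Int × Int) → List (List (Int × Int))
  | [] => []
  | p :: rest =>
    if p.2.2 = 1 then [pvXY p] :: pvRec rest
    else match pvRec rest with
      | [] => [[pvXY p]]
      | s :: ss => (pvXY p :: s) :: ss

def pvGlue (cur : List (Int × Int)) : List (List (Int × Int)) → List (List (Int × Int))
  | [] => if cur = [] then [] else [cur]
  | s :: ss => (cur ++ s) :: ss

def pvFin (st : List (List (Int × Int)) × List (Int × Int)) : List (List (Int × Int)) :=
  if st.2 ≠ [] then st.1 ++ [st.2] else st.1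

theorem pvGlue_nil (r : List (List (Int × Int))) : pvGlue [] r = r := by
  cases r <;> simp [pvGlue]

-- A-side: the accumulated strokes list only ever grows on the left
theorem foldA_append (l : List (Int × Int × Int)) (S : List (List (Int × Int)))
    (cur : List (Int × Int)) :
    l.foldl pvStepA (S, cur) =
      (S ++ (l.foldl pvStepA ([], cur)).1, (l.foldl pvStepA ([], cur)).2) := by
  induction l generalizing S cur with
  | nil => simp
  | cons p l ih =>
    simp only [List.foldl_cons, pvStepA]
    by_cases h : p.2.2 == 1
    · simp only [h, if_pos, List.nil_append]
      rw [ih (S ++ [cur ++ [pvXY p]]) [], ih [cur ++ [pvXY p]] []]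
      simp
    · simp only [h, if_neg, Bool.false_eq_true, not_false_iff]
      exact ih S (cur ++ [pvXY p])

theorem foldA_glue (l : List (Int × Int × Int)) (cur : List (Int × Int)) :
    pvFin (l.foldl pvStepA ([], cur)) = pvGlue cur (pvRec l) := by
  induction l generalizing cur with
  | nil => simp [pvFin, pvGlue, pvRec]
  | cons p l ih =>
    simp only [List.foldl_cons, pvStepA, pvRec]
    by_cases h : p.2.2 = 1
    · simp only [h, if_pos, beq_self_eq_true, List.nil_append]
      rw [foldA_append l [cur ++ [pvXY p]] []]
      have : pvFin ([cur ++ [pvXY p]] ++ (l.foldl pvStepA ([], [])).1,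
          (l.foldl pvStepA ([], [])).2) = [cur ++ [pvXY p]] ++ pvFin (l.foldl pvStepA ([], [])) := by
        simp only [pvFin]; split <;> simp
      rw [this, ih [], pvGlue_nil]
      cases pvRec l <;> simp [pvGlue]
    · have hb : (p.2.2 == 1) = false := by simp [h]
      simp only [hb, Bool.false_eq_true, if_neg, not_false_iff, h]
      rw [ih (cur ++ [pvXY p])]
      cases hr : pvRec l <;> simp [pvGlue]

theorem to_strokes_eq_pvRec (points : List (Int × Int × Int)) :
    to_strokes points = pvRec points := by
  cases points with
  | nil => rfl
  | cons p l =>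
    show pvFin ((p :: l).foldl pvStepA ([], [])) = _
    rw [foldA_glue, pvGlue_nil]

-- B-side lemmas
theorem enumerate_shift {α : Type} (xs : List α) (s : Int) :
    PySem.List.enumerate xs (s + 1) = (PySem.List.enumerate xs s).map (fun q => (q.1 + 1, q.2)) := by
  induction xs generalizing s with
  | nil => simp [PySem.List.enumerate_nil]
  | cons x xs ih =>
    rw [PySem.List.enumerate_cons, PySem.List.enumerate_cons, List.map_cons, ← ih]

theorem pvCuts_cons (p : Int × Int × Int) (rest : List (Int × Int × Int)) :
    pvCuts (p :: rest) =
      (if p.2.2 == 1 then [(0 : Int)] else []) ++ (pvCuts rest).map (· + 1) := by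
  simp only [pvCuts, PySem.List.enumerate_cons]
  rw [show (0 : Int) + 1 = 0 + 1 by ring, enumerate_shift]
  by_cases h : p.2.2 == 1 <;> simp [h, List.filter_map, List.map_map, Function.comp_def]

theorem pvCuts_nonneg (points : List (Int × Int × Int)) :
    ∀ c ∈ pvCuts points, 0 ≤ c := by
  induction points with
  | nil => simp [pvCuts]
  | cons p rest ih =>
    intro c hc
    rw [pvCuts_cons] at hc
    rcases List.mem_append.1 hc with h | h
    · split at h <;> simp_all
    · obtain ⟨d, hd, rfl⟩ := List.mem_map.1 h
      have := ih d hd; omega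

theorem pvCuts_nil_no_eos (points : List (Int × Int × Int)) (h : pvCuts points = []) :
    ∀ p ∈ points, ¬ (p.2.2 = 1) := by
  induction points with
  | nil => simp
  | cons p rest ih =>
    rw [pvCuts_cons] at h
    intro q hq
    rcases List.mem_cons.1 hq with rfl | hq
    · intro he
      simp [he] at h
    · exact ih (by simpa using (List.append_eq_nil_iff.1 h).2) q hq

theorem pvRec_no_eos (points : List (Int × Int × Int))
    (h : ∀ p ∈ points, ¬ (p.2.2 = 1)) :
    pvRec points = if points = [] then [] else [points.map pvXY] := by
  induction points with
  | nil => rfl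
  | cons p rest ih =>
    have hp : ¬ (p.2.2 = 1) := h p (by simp)
    have : pvRec rest = if rest = [] then [] else [rest.map pvXY] :=
      ih (fun q hq => h q (List.mem_cons_of_mem _ hq))
    simp only [pvRec, hp, if_neg, not_false_iff, this]
    cases rest <;> simp

theorem foldB_append (pts : List (Int × Int × Int)) (cs : List Int)
    (S : List (List (Int × Int))) (a : Int) :
    cs.foldl (pvStepB pts) (S, a) =
      (S ++ (cs.foldl (pvStepB pts) ([], a)).1, (cs.foldl (pvStepB pts) ([], a)).2) := by
  induction cs generalizing S a with
  | nil => simp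
  | cons c cs ih =>
    simp only [List.foldl_cons, pvStepB]
    rw [ih (S ++ _) (c + 1), ih ([] ++ _) (c + 1)]
    simp

theorem foldB_snd_nonneg (pts : List (Int × Int × Int)) (cs : List Int)
    (S : List (List (Int × Int))) (a : Int) (ha : 0 ≤ a) (hcs : ∀ c ∈ cs, 0 ≤ c) :
    0 ≤ (cs.foldl (pvStepB pts) (S, a)).2 := by
  induction cs generalizing S a with
  | nil => simpa
  | cons c cs ih =>
    simp only [List.foldl_cons, pvStepB]
    exact ih _ _ (by have := hcs c (by simp); omega) (fun d hd => hcs d (by simp [hd]))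

theorem slice_cons_shift (p : Int × Int × Int) (rest : List (Int × Int × Int))
    (a b : Int) (ha : 0 ≤ a) (hb : 0 ≤ b) :
    PySem.List.slice (p :: rest) (some (a + 1)) (some (b + 1)) =
      PySem.List.slice rest (some a) (some b) := by
  rw [PySem.List.slice_toNat _ (by omega : (0:Int) ≤ a + 1) (by omega : (0:Int) ≤ b + 1),
      PySem.List.slice_toNat _ ha hb]
  have h1 : (a + 1).toNat = a.toNat + 1 := by omega
  have h2 : (b + 1).toNat - (a + 1).toNat = b.toNat - a.toNat := by omega
  rw [h2, h1, List.drop_succ_cons]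

theorem slice_cons_shift_none (p : Int × Int × Int) (rest : List (Int × Int × Int))
    (a : Int) (ha : 0 ≤ a) :
    PySem.List.slice (p :: rest) (some (a + 1)) none = PySem.List.slice rest (some a) none := by
  rw [PySem.List.slice_from _ (by omega : (0:Int) ≤ a + 1), PySem.List.slice_from _ ha]
  have h1 : (a + 1).toNat = a.toNat + 1 := by omega
  rw [h1, List.drop_succ_cons]

theorem foldB_shift (p : Int × Int × Int) (rest : List (Int × Int × Int)) (cs : List Int)
    (hcs : ∀ c ∈ cs, 0 ≤ c) (S : List (List (Int × Int))) (a : Int) (ha : 0 ≤ a) :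
    (cs.map (· + 1)).foldl (pvStepB (p :: rest)) (S, a + 1) =
      ((cs.foldl (pvStepB rest) (S, a)).1, (cs.foldl (pvStepB rest) (S, a)).2 + 1) := by
  induction cs generalizing S a with
  | nil => simp
  | cons c cs ih =>
    have hc : 0 ≤ c := hcs c (by simp)
    simp only [List.map_cons, List.foldl_cons, pvStepB]
    rw [slice_cons_shift p rest a (c + 1) ha (by omega)]
    rw [show c + 1 + 1 = (c + 1) + 1 by ring]
    exact ih (fun d hd => hcs d (by simp [hd])) _ (c + 1) (by omega)

theorem to_strokes_alt_eq_pvRec (points : List (Int × Int × Int)) :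
    to_strokes_alt points = pvRec points := by
  induction points with
  | nil => rfl
  | cons p rest ih =>
    by_cases he : p.2.2 = 1
    · -- head closes a stroke: cuts = 0 :: shifted cuts of rest
      have hcuts : pvCuts (p :: rest) = 0 :: (pvCuts rest).map (· + 1) := by
        rw [pvCuts_cons]; simp [he]
      have hnn := pvCuts_nonneg rest
      simp only [to_strokes_alt, hcuts, List.foldl_cons, pvStepB]
      rw [show (0 : Int) + 1 = 0 + 1 by ring,
          foldB_shift p rest (pvCuts rest) hnn _ 0 le_rfl]
      rw [foldB_append rest (pvCuts rest) _ 0]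
      have hsl : PySem.List.slice (p :: rest) (some 0) (some (0 + 1)) = [p] := by
        rw [PySem.List.slice_toNat _ le_rfl (by omega)]; rfl
      have h2 := foldB_snd_nonneg rest (pvCuts rest) [] 0 le_rfl hnn
      simp only [hsl, List.map_cons, List.map_nil, List.nil_append, List.length_cons]
      push_cast
      by_cases hlt : ((pvCuts rest).foldl (pvStepB rest) ([], 0)).2 < (rest.length : Int)
      · rw [if_pos (by omega)]
        rw [slice_cons_shift_none p rest _ h2]
        have : pvRec (p :: rest) = [pvXY p] :: pvRec rest := by simp [pvRec, he]
        rw [this, ← ih]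
        simp [to_strokes_alt, hlt]
      · rw [if_neg (by omega)]
        have : pvRec (p :: rest) = [pvXY p] :: pvRec rest := by simp [pvRec, he]
        rw [this, ← ih]
        simp [to_strokes_alt, hlt]
    · -- head does not close a stroke
      have hcuts : pvCuts (p :: rest) = (pvCuts rest).map (· + 1) := by
        rw [pvCuts_cons]; simp [he]
      cases hcr : pvCuts rest with
      | nil =>
        -- no cuts at all: single trailing stroke
        have hno : ∀ q ∈ p :: rest, ¬ (q.2.2 = 1) := by
          intro q hq
          rcases List.mem_cons.1 hq with rfl | hq
          · exact he
          · exact pvCuts_nil_no_eos rest hcr q hq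
        have hsl : PySem.List.slice (p :: rest) (some 0) none = p :: rest := by
          rw [PySem.List.slice_from _ le_rfl]; rfl
        simp only [to_strokes_alt, hcuts, hcr, List.map_nil, List.foldl_nil]
        rw [pvRec_no_eos _ hno]
        simp [hsl]
      | cons c cs =>
        have hnn := pvCuts_nonneg rest
        have hc : 0 ≤ c := by have := hnn c (by simp [hcr]); omega
        have hcsnn : ∀ d ∈ cs, 0 ≤ d := fun d hd => hnn d (by simp [hcr, hd])
        -- slice points[0 : c+2] = p :: rest[0 : c+1]
        have hsl : PySem.List.slice (p :: rest) (some 0) (some (c + 1 + 1)) =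
            p :: PySem.List.slice rest (some 0) (some (c + 1)) := by
          rw [PySem.List.slice_toNat _ le_rfl (by omega),
              PySem.List.slice_toNat _ le_rfl (by omega)]
          have h1 : (c + 1 + 1).toNat = (c + 1).toNat + 1 := by omega
          simp [h1]
        have h2 := foldB_snd_nonneg rest cs [] (c + 1) (by omega) hcsnn
        simp only [to_strokes_alt, hcuts, hcr, List.map_cons, List.foldl_cons, pvStepB,
          List.nil_append]
        rw [show c + 1 + 1 = (c + 1) + 1 by ring,
            foldB_shift p rest cs hcsnn _ (c + 1) (by omega), hsl,
            foldB_append rest cs _ (c + 1)]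
        -- the corresponding unfolding of to_strokes_alt rest
        have hrest : to_strokes_alt rest =
            (if ((cs.foldl (pvStepB rest) ([], c + 1)).2) < (rest.length : Int) then
              ([(PySem.List.slice rest (some 0) (some (c + 1))).map pvXY] ++
                (cs.foldl (pvStepB rest) ([], c + 1)).1) ++
                [(PySem.List.slice rest (some (cs.foldl (pvStepB rest) ([], c + 1)).2) none).map pvXY]
            else
              [(PySem.List.slice rest (some 0) (some (c + 1))).map pvXY] ++
                (cs.foldl (pvStepB rest) ([], c + 1)).1) := by
          simp only [to_strokes_alt, hcr, List.foldl_cons, pvStepB, List.nil_append]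
          rw [foldB_append rest cs _ (c + 1)]
        have hglue : pvRec (p :: rest) = pvGlue [pvXY p] (pvRec rest) := by
          simp only [pvRec, he, if_neg, not_false_iff]
          cases pvRec rest <;> simp [pvGlue]
        rw [hglue, ← ih, hrest]
        by_cases hlt : ((cs.foldl (pvStepB rest) ([], c + 1)).2) < (rest.length : Int)
        · rw [if_pos hlt, if_pos (by simp only [List.length_cons]; push_cast; omega)]
          rw [slice_cons_shift_none p rest _ h2]
          simp [pvGlue]
        · rw [if_neg hlt, if_neg (by simp only [List.length_cons]; push_cast; omega)]
          simp [pvGlue]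

-- ===== VERDICT (by name: the statement is the Claim_ definition above) =====
theorem to_strokes_spec : Claim_equal_to_strokes := by
  intro points _
  unfold Spec_to_strokes
  rw [to_strokes_eq_pvRec, to_strokes_alt_eq_pvRec]
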